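-- pv_equiv track=rewrite | github.com/MatheoDarlo/password-Strenght-Tester- | backend/utils.py | leet_substitutions
-- ===== SOURCE A (Python) =====
-- def leet_substitutions(word):
--     subs = [
--         ('4', 'a'), ('@', 'a'),
--         ('3', 'e'),
--         ('1', 'i'), ('!', 'i'),
--         ('0', 'o'),
--         ('$', 's'),
--         ('7', 't'),
--         ('5', 's'),
--         ('8', 'b'),
--     ]
--     for leet, char in subs:
--         word = word.replace(leet, char)
--     return word
-- ===== SOURCE B (Python) =====
-- def leet_substitutions(word):
--     table = str.maketrans({'4': 'a', '@': 'a', '3': 'e', '1': 'i', '!': 'i',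
--                            '0': 'o', '$': 's', '7': 't', '5': 's', '8': 'b'})
--     return word.translate(table)
-- ===== Notes on version B (the rewrite author's own statement) =====
-- stated objective: idiomatic
-- what changed: B builds one substitution table and rewrites the string in a single pass with str.translate, instead of A's ten sequential full-string .replace scans; equal because no replacement target is also a source.
import Mathlib
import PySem

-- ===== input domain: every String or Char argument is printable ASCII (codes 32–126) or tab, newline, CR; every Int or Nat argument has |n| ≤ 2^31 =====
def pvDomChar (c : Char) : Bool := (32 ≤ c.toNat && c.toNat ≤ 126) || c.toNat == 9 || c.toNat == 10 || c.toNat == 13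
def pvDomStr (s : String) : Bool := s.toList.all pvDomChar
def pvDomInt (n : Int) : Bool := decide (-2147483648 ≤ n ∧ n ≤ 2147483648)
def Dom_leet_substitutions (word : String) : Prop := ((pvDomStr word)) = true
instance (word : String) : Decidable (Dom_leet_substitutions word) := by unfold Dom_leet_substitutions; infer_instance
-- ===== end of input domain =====

-- B replaces A's ten sequential full-string .replace passes by one substitution table
-- (str.maketrans) applied in a single str.translate pass; same result since no
-- replacement target is also a source.


-- ===== PORT A =====
-- A's literal substitution list
def leetSubs : List (String × String) :=
  [("4", "a"), ("@", "a"), ("3", "e"), ("1", "i"), ("!", "i"),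
   ("0", "o"), ("$", "s"), ("7", "t"), ("5", "s"), ("8", "b")]

def leet_substitutions (word : String) : String :=
  leetSubs.foldl (fun w p => PySem.Str.replace w p.1 p.2) word

-- ===== PORT B =====
-- B's translation table (str.maketrans dict; Char → Char)
def leetTable : PySem.Dict Char Char :=
  PySem.Dict.ofList
    [('4', 'a'), ('@', 'a'), ('3', 'e'), ('1', 'i'), ('!', 'i'),
     ('0', 'o'), ('$', 's'), ('7', 't'), ('5', 's'), ('8', 'b')]

-- word.translate(table): one pass, each char mapped through the table (identity if absent)
def leet_substitutions_alt (word : String) : String :=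
  String.ofList (word.toList.map (fun c => leetTable.getD c c))

-- ===== PRECONDITION & SPEC =====
def Spec_leet_substitutions (word : String) (out : String) : Prop := out = leet_substitutions_alt word
instance (word : String) (out : String) : Decidable (Spec_leet_substitutions word out) := by unfold Spec_leet_substitutions; infer_instance

-- ===== CLAIM (what is proved, stated in full; the proofs are below) =====
def Claim_equal_leet_substitutions : Prop := ∀ (word : String), Dom_leet_substitutions word → Spec_leet_substitutions word (leet_substitutions word)

-- ===== LEMMAS AND PROOFS =====

-- pointwise single-char substitution (what a single-char replace does to each char)
def subChar (a b c : Char) : Char := if c = a then b else c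


-- Chars.replace.go with a single-char pattern is the pointwise if-substitution.
theorem replace_go_single (a b : Char) :
    ∀ (l acc : List Char) (fuel : Nat), l.length ≤ fuel →
      PySem.Chars.replace.go [a] [b] fuel l acc
        = acc.reverse ++ l.map (fun c => if c = a then b else c) := by
  intro l
  induction l with
  | nil =>
      intro acc fuel _
      cases fuel <;> simp [PySem.Chars.replace.go]
  | cons c t ih =>
      intro acc fuel hle
      cases fuel with
      | zero => simp at hle
      | succ n =>
          by_cases h : c = a
          · subst h
            have hstep : PySem.Chars.replace.go [c] [b] (n+1) (c :: t) acc
                = PySem.Chars.replace.go [c] [b] n t ([b].reverse ++ acc) := by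
              simp [PySem.Chars.replace.go, List.isPrefixOf]
            rw [hstep, ih _ n (by simpa using hle)]
            simp
          · have hstep : PySem.Chars.replace.go [a] [b] (n+1) (c :: t) acc
                = PySem.Chars.replace.go [a] [b] n t (c :: acc) := by
              simp [PySem.Chars.replace.go, List.isPrefixOf, beq_iff_eq, Ne.symm h]
            rw [hstep, ih _ n (by simpa using hle)]
            simp [h]

-- Single-char replace is a map.
theorem replace_single (a b : Char) (l : List Char) :
    PySem.Chars.replace l [a] [b] = l.map (subChar a b) := by
  simp only [PySem.Chars.replace, List.isEmpty_cons, Bool.false_eq_true, if_false,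
    replace_go_single a b l [] l.length (le_refl _), List.reverse_nil, List.nil_append]
  rfl

-- The ten chained substitutions agree pointwise with one table lookup.
theorem pointwise (c : Char) :
    (subChar '8' 'b' ∘ subChar '5' 's' ∘ subChar '7' 't' ∘ subChar '$' 's' ∘ subChar '0' 'o' ∘
      subChar '!' 'i' ∘ subChar '1' 'i' ∘ subChar '3' 'e' ∘ subChar '@' 'a' ∘ subChar '4' 'a')
      c = leetTable.getD c c := by
  simp only [Function.comp_apply]
  by_cases h4 : c = '4'; · subst h4; decide
  by_cases hA : c = '@'; · subst hA; decide
  by_cases h3 : c = '3'; · subst h3; decide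
  by_cases h1 : c = '1'; · subst h1; decide
  by_cases hX : c = '!'; · subst hX; decide
  by_cases h0 : c = '0'; · subst h0; decide
  by_cases hS : c = '$'; · subst hS; decide
  by_cases h7 : c = '7'; · subst h7; decide
  by_cases h5 : c = '5'; · subst h5; decide
  by_cases h8 : c = '8'; · subst h8; decide
  have htab : leetTable = PySem.Dict.mk
      [('4', 'a'), ('@', 'a'), ('3', 'e'), ('1', 'i'), ('!', 'i'),
       ('0', 'o'), ('$', 's'), ('7', 't'), ('5', 's'), ('8', 'b')] := by decide
  simp [subChar, h4, hA, h3, h1, hX, h0, hS, h7, h5, h8,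
    htab, PySem.Dict.getD, PySem.Dict.get?, beq_iff_eq,
    Ne.symm h4, Ne.symm hA, Ne.symm h3, Ne.symm h1, Ne.symm hX,
    Ne.symm h0, Ne.symm hS, Ne.symm h7, Ne.symm h5, Ne.symm h8]

set_option maxHeartbeats 1000000 in
theorem leet_substitutions_spec : Claim_equal_leet_substitutions := by
  intro word _
  unfold Spec_leet_substitutions leet_substitutions leet_substitutions_alt leetSubs
  apply String.toList_inj.mp
  simp only [List.foldl_cons, List.foldl_nil, PySem.Str.replace, String.toList_ofList]
  simp only [show ("4":String).toList = ['4'] from rfl, show ("a":String).toList = ['a'] from rfl,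
    show ("@":String).toList = ['@'] from rfl, show ("3":String).toList = ['3'] from rfl,
    show ("e":String).toList = ['e'] from rfl, show ("1":String).toList = ['1'] from rfl,
    show ("i":String).toList = ['i'] from rfl, show ("!":String).toList = ['!'] from rfl,
    show ("0":String).toList = ['0'] from rfl, show ("o":String).toList = ['o'] from rfl,
    show ("$":String).toList = ['$'] from rfl, show ("s":String).toList = ['s'] from rfl,
    show ("7":String).toList = ['7'] from rfl, show ("t":String).toList = ['t'] from rfl,
    show ("5":String).toList = ['5'] from rfl, show ("8":String).toList = ['8'] from rfl,
    show ("b":String).toList = ['b'] from rfl]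
  simp only [replace_single, List.map_map]
  exact List.map_congr_left fun c _ => pointwise c
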